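-- pv_equiv track=rewrite | github.com/TheRandomOwl/Data-Project-YouTube | myfunctions.py | least_frequent
-- ===== SOURCE A (Python) =====
-- def least_frequent(data, key):
--     """
--     Find the least frequent value of a key in a list of dictionaries.
--
--     Args:
--         data (list): A list of dictionaries.
--         key (str): The key to find the least frequent value.
--
--     Returns:
--         str: The least frequent value of the key in the list of dictionaries.
--              If the key does not exist in any of the dictionaries, an empty string is returned.
--              If there are multiple values with the same frequency, the first value encountered is returned.
--
--     Examples:
--         >>> data = [{'a': 'apple', 'b': 'tomato', 'c': 'banana'}, {'a': 'pear', 'b': 'tomato', 'c': 'banana'}, {'a': 'apple', 'b': 'potato', 'c': 'banana'}]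
--         >>> least_frequent(data, 'a')
--         'pear'
--         >>> least_frequent(data, 'b')
--         'potato'
--         >>> least_frequent(data, 'nonexistent key')
--         ''
--         >>> least_frequent([], 'a')
--         ''
--         >>> least_frequent([{'a': 1}, {'a': 2}, {'a': 2}, {'a': 1}], 'a')
--         1
--     """
--     if data == []:
--         return ''
--     freq_dict = {}
--     for entry in data:
--         if key in entry:
--             value = entry[key]
--             if value in freq_dict:
--                 freq_dict[value] += 1
--             else:
--                 freq_dict[value] = 1
--     if not freq_dict:
--         return ''
--     least_frequent_value = min(freq_dict, key=freq_dict.get)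
--     return least_frequent_value
-- ===== SOURCE B (Python) =====
-- def least_frequent(data, key):
--     values = [entry[key] for entry in data if key in entry]
--     if not values:
--         return ''
--
--     def best(vals):
--         # (value, frequency) of the least frequent value, earliest-first on ties
--         v = vals[0]
--         rest = [x for x in vals if x != v]
--         c = len(vals) - len(rest)
--         if not rest:
--             return (v, c)
--         bv, bc = best(rest)
--         return (v, c) if c <= bc else (bv, bc)
--
--     return best(values)[0]
-- ===== Notes on version B (the rewrite author's own statement) =====
-- stated objective: alternative
-- what changed: Replaces A's frequency-dict tabulation plus min-over-keys by a recursive partition: take the first value, filter out all its occurrences, obtain its frequency as the length difference, recurse on the remainder, and keep the earlier value on ties; no dict, no min and no count.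
import Mathlib
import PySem

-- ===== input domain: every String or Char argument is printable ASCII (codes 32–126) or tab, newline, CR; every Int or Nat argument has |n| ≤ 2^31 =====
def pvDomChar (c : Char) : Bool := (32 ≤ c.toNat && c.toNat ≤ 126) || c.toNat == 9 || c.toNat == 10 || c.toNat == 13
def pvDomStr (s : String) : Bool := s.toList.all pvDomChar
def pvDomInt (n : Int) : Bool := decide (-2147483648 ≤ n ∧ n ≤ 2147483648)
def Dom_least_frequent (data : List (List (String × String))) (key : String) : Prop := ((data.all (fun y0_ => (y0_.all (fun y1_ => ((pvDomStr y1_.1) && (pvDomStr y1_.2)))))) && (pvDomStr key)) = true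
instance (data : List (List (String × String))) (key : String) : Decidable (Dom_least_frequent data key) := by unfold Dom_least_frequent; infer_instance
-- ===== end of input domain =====

-- B replaces A's frequency-dict tabulation + min-over-keys by a recursive partition of the
-- values list (first value filtered out, its frequency = the length difference, recurse on
-- the rest, earlier value kept on ties): alternative algorithm, same result.

-- ===== PORT A =====
-- the body of A's 'for entry in data' loop: 'if key in entry: value = entry[key]; …' tallied into freq_dict
def lfUpd (key : String) (d : PySem.Dict String Int) (entry : List (String × String)) : PySem.Dict String Int :=
  match (PySem.Dict.ofList entry).get? key with        -- 'if key in entry: value = entry[key]'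
  | some value =>
      if d.contains value then d.insert value (d.getD value 0 + 1)  -- 'freq_dict[value] += 1'
      else d.insert value 1                                          -- 'freq_dict[value] = 1'
  | none => d

-- 'min(freq_dict, key=freq_dict.get)': every key of freq is present, so freq.get k = the stored
-- count; ported as 'getD k 0' over the keys list (min? keeps the first minimal key, as Python's min does).
def least_frequent (data : List (List (String × String))) (key : String) : String :=
  if data = [] then "" else
  let freq : PySem.Dict String Int := data.foldl (lfUpd key) PySem.Dict.empty
  if freq.items = [] then ""                           -- 'if not freq_dict: return '''
  else match PySem.List.min? freq.keys (fun k => freq.getD k 0) with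
       | some v => v
       | none => ""                                    -- unreachable: keys nonempty

-- first-occurrence filter rewrites (cited by lfBest's termination proof)
theorem filter_ne_cons_self (v : String) (t : List String) :
    (v :: t).filter (fun x => x ≠ v) = t.filter (fun x => x ≠ v) := by
  simp [List.filter_cons]

-- ===== PORT B =====
-- Python's inner 'def best(vals)': vals[0], rest = [x for x in vals if x != v],
-- c = len(vals) - len(rest); recursion on rest, earlier value kept on ties.
def lfBest : List String → String × Int
  | [] => ("", 0)                       -- unreachable: best is only called on nonempty lists
  | v :: t =>
      let rest := (v :: t).filter (fun x => x ≠ v)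
      let c : Int := ((v :: t).length : Int) - (rest.length : Int)
      if rest = [] then (v, c)
      else
        let p := lfBest rest
        if c ≤ p.2 then (v, c) else p
  termination_by vals => vals.length
  decreasing_by
    rw [filter_ne_cons_self]
    exact Nat.lt_succ_of_le (List.length_filter_le _ t)

def least_frequent_alt (data : List (List (String × String))) (key : String) : String :=
  let values := data.filterMap (fun entry => (PySem.Dict.ofList entry).get? key)
  if values = [] then "" else (lfBest values).1

-- ===== PRECONDITION & SPEC =====
def Spec_least_frequent (data : List (List (String × String))) (key : String) (out : String) : Prop := out = least_frequent_alt data key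
instance (data : List (List (String × String))) (key : String) (out : String) : Decidable (Spec_least_frequent data key out) := by unfold Spec_least_frequent; infer_instance

-- ===== CLAIM (what is proved, stated in full; the proofs are below) =====
def Claim_equal_least_frequent : Prop := ∀ (data : List (List (String × String))) (key : String), Dom_least_frequent data key → Spec_least_frequent data key (least_frequent data key)

-- ===== LEMMAS AND PROOFS =====

-- the body of min?'s fold
def lfStep (key : String → Int) (acc : Option String) (x : String) : Option String :=
  match acc with
  | none => some x
  | some m => if key x < key m then some x else some m

theorem min?_eq_foldl_lfStep (xs : List String) (key : String → Int) :
    PySem.List.min? xs key = xs.foldl (lfStep key) none := by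
  simp only [PySem.List.min?]
  apply PySem.List.foldl_congr_mem
  intro acc x _
  cases acc <;> rfl

theorem foldl_lfStep_fixed (key : String → Int) (seen : List String) (acc : Option String)
    (h : ∀ x ∈ seen, lfStep key acc x = acc) : seen.foldl (lfStep key) acc = acc := by
  induction seen with
  | nil => rfl
  | cons y t ih =>
      simp only [List.foldl_cons, h y (by simp)]
      exact ih (fun x hx => h x (by simp [hx]))

-- Set.add only appends: the fold of add over xs keeps seen as a prefix
theorem foldl_add_prefix : ∀ (xs seen : List String),
    ∃ rest, xs.foldl PySem.Set.add seen = seen ++ rest := by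
  intro xs
  induction xs with
  | nil => intro seen; exact ⟨[], by simp⟩
  | cons y t ih =>
      intro seen
      simp only [List.foldl_cons]
      by_cases hy : y ∈ seen
      · have hadd : PySem.Set.add seen y = seen := by simp [PySem.Set.add, hy]
        rw [hadd]
        exact ih seen
      · have hadd : PySem.Set.add seen y = seen ++ [y] := by simp [PySem.Set.add, hy]
        rw [hadd]
        obtain ⟨r, hr⟩ := ih (seen ++ [y])
        exact ⟨[y] ++ r, by rw [hr, List.append_assoc]⟩

-- folding min?'s step over the first-occurrence dedup of xs equals folding it over xs itself
theorem foldl_lfStep_add (key : String → Int) :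
    ∀ (xs seen : List String) (acc : Option String),
      (∀ x ∈ seen, lfStep key acc x = acc) →
      (xs.foldl PySem.Set.add seen).foldl (lfStep key) acc = xs.foldl (lfStep key) acc := by
  intro xs
  induction xs with
  | nil => intro seen acc h; exact foldl_lfStep_fixed key seen acc h
  | cons y t ih =>
      intro seen acc h
      simp only [List.foldl_cons]
      by_cases hy : y ∈ seen
      · have hadd : PySem.Set.add seen y = seen := by simp [PySem.Set.add, hy]
        rw [hadd, ih seen acc h, h y hy]
      · have hadd : PySem.Set.add seen y = seen ++ [y] := by simp [PySem.Set.add, hy]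
        rw [hadd]
        set acc' := lfStep key acc y with hacc'
        have h' : ∀ x ∈ seen ++ [y], lfStep key acc' x = acc' := by
          intro x hx
          rcases List.mem_append.mp hx with hxs | hxy
          · have hfix := h x hxs
            cases hacc : acc with
            | none => rw [hacc] at hfix; simp [lfStep] at hfix
            | some m =>
                rw [hacc] at hfix
                have hxm : ¬ key x < key m := by
                  intro hc
                  have h2 := hfix
                  simp [lfStep, hc] at h2
                  subst h2
                  exact lt_irrefl _ hc
                rw [hacc', hacc]
                simp only [lfStep]
                by_cases hym : key y < key m
                · simp only [if_pos hym]
                  have hxy2 : ¬ key x < key y := by omega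
                  simp [hxy2]
                · simp [hym, hxm]
          · have hxy2 : x = y := by simpa using hxy
            subst hxy2
            rw [hacc']
            cases hacc : acc with
            | none => simp [lfStep]
            | some m =>
                simp only [lfStep]
                by_cases hym : key x < key m
                · simp [hym]
                · simp [hym]
        obtain ⟨rest, hrest⟩ := foldl_add_prefix t (seen ++ [y])
        rw [hrest, List.foldl_append, List.foldl_append,
            foldl_lfStep_fixed key seen acc h, List.foldl_cons, List.foldl_nil, ← hacc']
        have hih := ih (seen ++ [y]) acc' h'
        rw [hrest, List.foldl_append, foldl_lfStep_fixed key (seen ++ [y]) acc' h'] at hih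
        exact hih

theorem min?_ofList (xs : List String) (key : String → Int) :
    PySem.List.min? (PySem.Set.ofList xs) key = PySem.List.min? xs key := by
  rw [min?_eq_foldl_lfStep, min?_eq_foldl_lfStep, PySem.Set.ofList_eq_foldl]
  exact foldl_lfStep_add key xs [] none (by simp)

-- A's per-value update is exactly the counter update
theorem lf_update_eq (d : PySem.Dict String Int) (v : String) :
    (if d.contains v then d.insert v (d.getD v 0 + 1) else d.insert v 1)
      = d.insert v (d.getD v 0 + 1) := by
  by_cases h : d.contains v
  · simp [h]
  · have h0 : d.getD v 0 = 0 :=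
      PySem.Dict.getD_of_not_contains d 0 (by simpa using h)
    simp [h, h0]

-- A's loop over data is the counter loop over the values that B collects
theorem lf_foldl_eq_counter (data : List (List (String × String))) (key : String) :
    ∀ (d : PySem.Dict String Int),
      data.foldl (lfUpd key) d
        = (data.filterMap (fun entry => (PySem.Dict.ofList entry).get? key)).foldl
            (fun d x => d.insert x (d.getD x 0 + 1)) d := by
  induction data with
  | nil => intro d; rfl
  | cons e t ih =>
      intro d
      simp only [List.foldl_cons, List.filterMap_cons, lfUpd]
      cases (PySem.Dict.ofList e).get? key with
      | none => exact ih d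
      | some v =>
          simp only [List.foldl_cons, lf_update_eq d v]
          exact ih (d.insert v (d.getD v 0 + 1))

theorem lf_freq_eq_counter (data : List (List (String × String))) (key : String) :
    data.foldl (lfUpd key) PySem.Dict.empty
      = PySem.Dict.counter (data.filterMap (fun entry => (PySem.Dict.ofList entry).get? key)) := by
  rw [lf_foldl_eq_counter data key PySem.Dict.empty,
      PySem.Dict.foldl_insert_getD_add_one_eq_counter]

theorem ofList_ne_nil (xs : List String) (h : xs ≠ []) : PySem.Set.ofList xs ≠ [] := by
  cases xs with
  | nil => exact absurd rfl h
  | cons y t =>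
      intro hc
      have hy : y ∈ PySem.Set.ofList (y :: t) := (PySem.Set.mem_ofList _ _).mpr (by simp)
      rw [hc] at hy
      simp at hy

-- ===== lemmas for B's recursive partition =====

theorem filter_ne_cons (x v : String) (h : x ≠ v) (t : List String) :
    (x :: t).filter (fun y => y ≠ v) = x :: t.filter (fun y => y ≠ v) := by
  simp [List.filter_cons, h]

theorem count_cons_ne (a b : String) (l : List String) (h : ¬ a = b) :
    (b :: l).count a = l.count a := by
  have hba : (b == a) = false := by
    simp only [beq_eq_false_iff_ne]
    exact fun h2 => h h2.symm
  simp [List.count_cons, hba]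

-- skipping later duplicates of v does not change the fold, once the accumulator's key is ≤ key v
theorem foldl_lfStep_filter (key : String → Int) (v : String) :
    ∀ (t : List String) (m : String), key m ≤ key v →
      t.foldl (lfStep key) (some m) = (t.filter (fun x => x ≠ v)).foldl (lfStep key) (some m) := by
  intro t
  induction t with
  | nil => intro m _; rfl
  | cons x t ih =>
      intro m hm
      by_cases hxv : x = v
      · have hstep : lfStep key (some m) x = some m := by
          simp only [lfStep, hxv, if_neg (by omega : ¬ key v < key m)]
        rw [show (x :: t).filter (fun y => y ≠ v) = t.filter (fun y => y ≠ v) by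
              rw [hxv]; exact filter_ne_cons_self v t,
            List.foldl_cons, hstep]
        exact ih m hm
      · rw [filter_ne_cons x v hxv t, List.foldl_cons, List.foldl_cons]
        simp only [lfStep]
        by_cases hx : key x < key m
        · simp only [if_pos hx]
          exact ih x (by omega)
        · simp only [if_neg hx]
          exact ih m hm

-- the fold depends on key only through its values on the list and the accumulator
theorem foldl_lfStep_congr (k1 k2 : String → Int) :
    ∀ (xs : List String) (acc : Option String),
      (∀ x ∈ xs, k1 x = k2 x) → (∀ m, acc = some m → k1 m = k2 m) →
      xs.foldl (lfStep k1) acc = xs.foldl (lfStep k2) acc := by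
  intro xs
  induction xs with
  | nil => intro acc _ _; rfl
  | cons x t ih =>
      intro acc hxs hacc
      have hx : k1 x = k2 x := hxs x (by simp)
      have hstep : lfStep k1 acc x = lfStep k2 acc x := by
        cases hc : acc with
        | none => rfl
        | some m => simp only [lfStep, hx, hacc m hc]
      simp only [List.foldl_cons, hstep]
      apply ih
      · intro y hy; exact hxs y (by simp [hy])
      · intro m hm
        cases hc : acc with
        | none =>
            rw [hc] at hm; simp only [lfStep] at hm
            cases hm; exact hx
        | some m0 =>
            rw [hc] at hm; simp only [lfStep] at hm
            by_cases h : k2 x < k2 m0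
            · simp only [if_pos h] at hm
              injection hm with h2
              exact h2 ▸ hx
            · simp only [if_neg h] at hm
              injection hm with h2
              exact h2 ▸ hacc m0 hc

-- a fold started at 'some a' in terms of the fold started at 'none'
theorem foldl_lfStep_some (key : String → Int) :
    ∀ (xs : List String) (a : String),
      xs.foldl (lfStep key) (some a)
        = match xs.foldl (lfStep key) none with
          | none => some a
          | some m => if key m < key a then some m else some a := by
  intro xs
  induction xs with
  | nil => intro a; rfl
  | cons x t ih =>
      intro a
      simp only [List.foldl_cons]
      rw [show lfStep key none x = some x from rfl]
      rw [show lfStep key (some a) x = if key x < key a then some x else some a from rfl]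
      by_cases hxa : key x < key a
      · rw [if_pos hxa, ih x]
        cases t.foldl (lfStep key) none with
        | none => simp [hxa]
        | some m =>
            dsimp only
            split_ifs <;> dsimp only <;> (try split_ifs) <;> first | rfl | (exfalso; omega)
      · rw [if_neg hxa, ih a, ih x]
        cases t.foldl (lfStep key) none with
        | none => simp [hxa]
        | some m =>
            dsimp only
            split_ifs <;> dsimp only <;> (try split_ifs) <;> first | rfl | (exfalso; omega)

-- length = count of v + length of the filtered rest
theorem length_eq_count_add_filter (v : String) :
    ∀ (l : List String), l.length = l.count v + (l.filter (fun x => x ≠ v)).length := by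
  intro l
  induction l with
  | nil => rfl
  | cons x t ih =>
      by_cases hxv : x = v
      · rw [show (x :: t).filter (fun y => y ≠ v) = t.filter (fun y => y ≠ v) by
              rw [hxv]; exact filter_ne_cons_self v t]
        rw [hxv, List.count_cons_self, List.length_cons]
        omega
      · rw [filter_ne_cons x v hxv t,
            count_cons_ne v x t (fun h => hxv h.symm),
            List.length_cons, List.length_cons]
        omega

theorem count_filter_ne (v x : String) (hx : ¬ x = v) :
    ∀ (l : List String), (l.filter (fun y => y ≠ v)).count x = l.count x := by
  intro l
  induction l with
  | nil => rfl
  | cons y t ih =>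
      by_cases hyv : y = v
      · rw [show (y :: t).filter (fun z => z ≠ v) = t.filter (fun z => z ≠ v) by
              rw [hyv]; exact filter_ne_cons_self v t]
        rw [ih, count_cons_ne x y t (by rw [hyv]; exact hx)]
      · rw [filter_ne_cons y v hyv t]
        by_cases hxy : x = y
        · rw [← hxy, List.count_cons_self, List.count_cons_self, ih]
        · rw [count_cons_ne x y _ hxy, count_cons_ne x y t hxy, ih]

-- B's recursion computes the first least frequent value together with its frequency
theorem lfBest_correct :
    ∀ (n : Nat) (vals : List String), vals.length ≤ n → vals ≠ [] →
      PySem.List.min? vals (fun v => (vals.count v : Int)) = some (lfBest vals).1 ∧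
      (lfBest vals).2 = ((lfBest vals).1 |> vals.count : Int) := by
  intro n
  induction n with
  | zero => intro vals hlen hne; cases vals with
      | nil => exact absurd rfl hne
      | cons v t => simp at hlen
  | succ k ih =>
      intro vals hlen hne
      obtain ⟨v, t, rfl⟩ : ∃ v t, vals = v :: t := by
        cases vals with
        | nil => exact absurd rfl hne
        | cons v t => exact ⟨v, t, rfl⟩
      have hfc : (v :: t).filter (fun x => x ≠ v) = t.filter (fun x => x ≠ v) :=
        filter_ne_cons_self v t
      have hcnt : (((v :: t).count v : Nat) : Int)
          = ((v :: t).length : Int) - ((t.filter (fun x => x ≠ v)).length : Int) := by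
        have h1 := length_eq_count_add_filter v (v :: t)
        rw [hfc] at h1
        omega
      have hub : lfBest (v :: t)
          = if t.filter (fun x => x ≠ v) = []
            then (v, ((v :: t).length : Int) - ((t.filter (fun x => x ≠ v)).length : Int))
            else (let p := lfBest (t.filter (fun x => x ≠ v));
                  if ((v :: t).length : Int) - ((t.filter (fun x => x ≠ v)).length : Int) ≤ p.2
                  then (v, ((v :: t).length : Int) - ((t.filter (fun x => x ≠ v)).length : Int))
                  else p) := by
        rw [lfBest, hfc]
      have hmin : PySem.List.min? (v :: t) (fun x => ((v :: t).count x : Int))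
          = (t.filter (fun x => x ≠ v)).foldl (lfStep (fun x => ((v :: t).count x : Int))) (some v) := by
        rw [min?_eq_foldl_lfStep]
        simp only [List.foldl_cons]
        rw [show lfStep (fun x => ((v :: t).count x : Int)) none v = some v from rfl]
        exact foldl_lfStep_filter _ v t v le_rfl
      by_cases hre : t.filter (fun x => x ≠ v) = []
      · rw [hub, if_pos hre]
        refine ⟨?_, ?_⟩
        · rw [hmin, hre]
          rfl
        · exact hcnt.symm
      · -- recursive case
        have hlen2 : (t.filter (fun x => x ≠ v)).length ≤ k := by
          have h1 : (t.filter (fun x => x ≠ v)).length ≤ t.length := List.length_filter_le _ _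
          simp only [List.length_cons] at hlen
          omega
        obtain ⟨ih1, ih2⟩ := ih (t.filter (fun x => x ≠ v)) hlen2 hre
        have hmem : (lfBest (t.filter (fun x => x ≠ v))).1 ∈ t.filter (fun x => x ≠ v) :=
          PySem.List.min?_mem ih1
        have hpne : ¬ (lfBest (t.filter (fun x => x ≠ v))).1 = v := by
          have := List.of_mem_filter hmem
          simpa using this
        have hcount_same : ∀ x : String, ¬ x = v →
            (v :: t).count x = (t.filter (fun y => y ≠ v)).count x := by
          intro x hxv
          rw [count_cons_ne x v t hxv, count_filter_ne v x hxv t]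
        have hkeyp : (((v :: t).count (lfBest (t.filter (fun x => x ≠ v))).1 : Nat) : Int)
            = (lfBest (t.filter (fun x => x ≠ v))).2 := by
          rw [hcount_same _ hpne]
          exact ih2.symm
        have hcongr : PySem.List.min? (t.filter (fun x => x ≠ v)) (fun x => ((v :: t).count x : Int))
            = PySem.List.min? (t.filter (fun x => x ≠ v)) (fun x => (((t.filter (fun y => y ≠ v)).count x : Nat) : Int)) := by
          rw [min?_eq_foldl_lfStep, min?_eq_foldl_lfStep]
          apply foldl_lfStep_congr
          · intro x hx
            have hxv : ¬ x = v := by simpa using List.of_mem_filter hx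
            simp only [hcount_same x hxv]
          · intro m hm; cases hm
        have hfold : (t.filter (fun x => x ≠ v)).foldl (lfStep (fun x => ((v :: t).count x : Int))) (some v)
            = if (((v :: t).count (lfBest (t.filter (fun x => x ≠ v))).1 : Nat) : Int)
                 < (((v :: t).count v : Nat) : Int)
              then some (lfBest (t.filter (fun x => x ≠ v))).1 else some v := by
          rw [foldl_lfStep_some]
          have hres : (t.filter (fun x => x ≠ v)).foldl (lfStep (fun x => ((v :: t).count x : Int))) none
              = some (lfBest (t.filter (fun x => x ≠ v))).1 := by
            rw [← min?_eq_foldl_lfStep, hcongr]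
            exact ih1
          rw [hres]
        rw [hub, if_neg hre]
        simp only
        by_cases hle : ((v :: t).length : Int) - ((t.filter (fun x => x ≠ v)).length : Int)
            ≤ (lfBest (t.filter (fun x => x ≠ v))).2
        · rw [if_pos hle]
          refine ⟨?_, ?_⟩
          · rw [hmin, hfold, if_neg (by rw [hkeyp, hcnt]; omega)]
          · exact hcnt.symm
        · rw [if_neg hle]
          refine ⟨?_, ?_⟩
          · rw [hmin, hfold, if_pos (by rw [hkeyp, hcnt]; omega)]
          · rw [ih2]
            simp only [hcount_same _ hpne]

-- ===== VERDICT (by name: the statement is the Claim_ definition above) =====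
theorem least_frequent_spec : Claim_equal_least_frequent := by
  intro data key _
  unfold Spec_least_frequent least_frequent least_frequent_alt
  rw [lf_freq_eq_counter data key]
  set values := data.filterMap (fun entry => (PySem.Dict.ofList entry).get? key) with hv
  by_cases hval : values = []
  · have hemp : (PySem.Dict.empty : PySem.Dict String Int).items = [] := rfl
    rw [hval]
    by_cases hd : data = [] <;> simp [hd, PySem.Dict.counter, hemp]
  · have hd : data ≠ [] := by
      intro hc; apply hval; rw [hv, hc]; rfl
    have hitems : (PySem.Dict.counter values).items ≠ [] := by
      rw [PySem.Dict.items_counter]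
      simp only [ne_eq, List.map_eq_nil_iff]
      exact ofList_ne_nil values hval
    rw [if_neg hd, if_neg hitems, if_neg hval]
    have hgetD : (fun k => (PySem.Dict.counter values).getD k 0)
        = fun k => (values.count k : Int) := by
      funext k; exact_mod_cast PySem.Dict.getD_counter values k
    rw [PySem.Dict.keys_counter, hgetD, min?_ofList]
    rw [(lfBest_correct values.length values le_rfl hval).1]
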